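-- pv_equiv track=rewrite | github.com/paul-trement-kelveen/blackbox-fw-b1 | scripts/ram_forensics.py | extraire_chaines
-- ===== SOURCE A (Python) =====
-- def extraire_chaines(data, min_len=4):
--     """Extrait les chaines ASCII lisibles d'au moins min_len caracteres."""
--     chaines = []
--     current = []
--     offset_debut = 0
--
--     for i, b in enumerate(data):
--         if 32 <= b < 127:
--             if not current:
--                 offset_debut = i
--             current.append(chr(b))
--         else:
--             if len(current) >= min_len:
--                 chaines.append((offset_debut, ''.join(current)))
--             current = []
--
--     if len(current) >= min_len:
--         chaines.append((offset_debut, ''.join(current)))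
--
--     return chaines
-- ===== SOURCE B (Python) =====
-- def extraire_chaines(data, min_len=4):
--     """Extrait les chaines ASCII lisibles d'au moins min_len caracteres."""
--     res = []
--     n = len(data)
--     i = 0
--     while i < n:
--         if 32 <= data[i] < 127:
--             j = i + 1
--             while j < n and 32 <= data[j] < 127:
--                 j += 1
--             if j - i >= min_len:
--                 res.append((i, ''.join(chr(c) for c in data[i:j])))
--             i = j
--         else:
--             i += 1
--     return res
-- ===== Notes on version B (the rewrite author's own statement) =====
-- stated objective: alternative
-- what changed: Replaces the accumulator loop (current char list, offset_debut tracking, duplicated flush-at-boundary/flush-at-end logic) with a two-pointer index scan that finds each maximal printable run with an inner scan and slices it out in one piece.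
-- outside the precondition, e.g. on extraire_chaines([10], 0): A returns [(0, ''), (0, '')], B returns []; on extraire_chaines([65, 66], -3): A returns [(0, 'AB')], B returns [(0, 'AB')]
import Mathlib
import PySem

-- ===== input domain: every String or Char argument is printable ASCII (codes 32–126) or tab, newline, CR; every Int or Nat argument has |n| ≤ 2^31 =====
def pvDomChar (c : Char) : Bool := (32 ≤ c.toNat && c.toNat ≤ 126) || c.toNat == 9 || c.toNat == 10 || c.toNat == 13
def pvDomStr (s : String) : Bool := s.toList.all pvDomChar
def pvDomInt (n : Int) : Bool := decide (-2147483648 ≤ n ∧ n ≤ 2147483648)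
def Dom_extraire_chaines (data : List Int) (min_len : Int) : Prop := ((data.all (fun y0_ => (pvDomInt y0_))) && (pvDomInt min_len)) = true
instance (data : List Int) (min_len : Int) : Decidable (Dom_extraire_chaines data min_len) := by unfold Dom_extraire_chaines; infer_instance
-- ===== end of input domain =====

-- B replaces A's accumulator/flush loop by a two-pointer scan over maximal printable runs (alternative decomposition, same O(n) cost); Pre_ restricts to min_len ≥ 1 (see the Pre_ comment).


-- ===== PORT A =====
-- the for-loop over enumerate(data) with state (chaines, current, offset_debut), final flush in the [] case
def pvLoopA (min_len : Int) : List Int → Int → List (Int × String) → List Char → Int → List (Int × String)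
  | [], _, chaines, current, off =>
      if min_len ≤ (current.length : Int) then chaines ++ [(off, String.ofList current)] else chaines
  | b :: rest, i, chaines, current, off =>
      if 32 ≤ b ∧ b < 127 then
        pvLoopA min_len rest (i + 1) chaines (current ++ [Char.ofNat b.toNat])
          (if current.isEmpty then i else off)
      else if min_len ≤ (current.length : Int) then
        pvLoopA min_len rest (i + 1) (chaines ++ [(off, String.ofList current)]) [] off
      else
        pvLoopA min_len rest (i + 1) chaines [] off

def extraire_chaines (data : List Int) (min_len : Int) : List (Int × String) :=
  pvLoopA min_len data 0 [] [] 0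

-- ===== PORT B =====
-- inner while: length of the leading printable run
def pvRunLen : List Int → Nat
  | [] => 0
  | b :: rest => if 32 ≤ b ∧ b < 127 then 1 + pvRunLen rest else 0

-- outer while over index i (list suffix = position i); at a printable byte jump to the run end j = i + k
def pvScanB (min_len : Int) : List Int → Int → List (Int × String)
  | [], _ => []
  | b :: rest, i =>
      if 32 ≤ b ∧ b < 127 then
        let k := 1 + pvRunLen rest
        (if min_len ≤ (k : Int) then
            [(i, String.ofList (((b :: rest).take k).map (fun c => Char.ofNat c.toNat)))]
          else []) ++ pvScanB min_len ((b :: rest).drop k) (i + (k : Int))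
      else pvScanB min_len rest (i + 1)
  termination_by xs _ => xs.length
  decreasing_by
    all_goals simp only [List.length_drop, List.length_cons]
    · omega
    · omega

def extraire_chaines_alt (data : List Int) (min_len : Int) : List (Int × String) :=
  pvScanB min_len data 0

-- ===== PRECONDITION & SPEC =====
-- Pre_ excludes min_len ≤ 0 (A raises nowhere, so this narrows the domain A returns on): there the
-- length threshold is vacuous and A's flush logic emits accidental ('', stale-offset) pairs whose
-- offsets come from leftover loop state, a value no re-implementation would reproduce; B returns
-- just the actual printable runs there.
def Pre_extraire_chaines (_data : List Int) (min_len : Int) : Prop := 1 ≤ min_len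
instance (data : List Int) (min_len : Int) : Decidable (Pre_extraire_chaines data min_len) := by
  unfold Pre_extraire_chaines; infer_instance

def pvWitness_extraire_chaines : List Int × Int := ([72, 105, 33, 10, 65, 66, 67, 68], 2)

def Spec_extraire_chaines (data : List Int) (min_len : Int) (out : List (Int × String)) : Prop := out = extraire_chaines_alt data min_len
instance (data : List Int) (min_len : Int) (out : List (Int × String)) : Decidable (Spec_extraire_chaines data min_len out) := by unfold Spec_extraire_chaines; infer_instance

-- ===== CLAIM (what is proved, stated in full; the proofs are below) =====
def Claim_equal_extraire_chaines : Prop := ∀ (data : List Int) (min_len : Int), Dom_extraire_chaines data min_len → Pre_extraire_chaines data min_len → Spec_extraire_chaines data min_len (extraire_chaines data min_len)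

-- ===== LEMMAS AND PROOFS =====

theorem pvRunLen_le (xs : List Int) : pvRunLen xs ≤ xs.length := by
  induction xs with
  | nil => simp [pvRunLen]
  | cons b rest ih => simp only [pvRunLen, List.length_cons]; split <;> omega

theorem pvRunLen_take (xs : List Int) : ∀ b ∈ xs.take (pvRunLen xs), 32 ≤ b ∧ b < 127 := by
  induction xs with
  | nil => simp
  | cons b rest ih =>
    simp only [pvRunLen]
    split
    · rename_i h
      rw [show 1 + pvRunLen rest = pvRunLen rest + 1 by omega, List.take_succ_cons]
      intro x hx
      rcases List.mem_cons.1 hx with h1 | h2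
      · exact h1 ▸ h
      · exact ih x h2
    · simp

theorem pvRunLen_drop (xs : List Int) :
    xs.drop (pvRunLen xs) = [] ∨
      ∃ c ys, xs.drop (pvRunLen xs) = c :: ys ∧ ¬(32 ≤ c ∧ c < 127) := by
  induction xs with
  | nil => left; simp
  | cons b rest ih =>
    simp only [pvRunLen]
    split
    · rw [show 1 + pvRunLen rest = pvRunLen rest + 1 by omega, List.drop_succ_cons]
      exact ih
    · right; exact ⟨b, rest, by simp, by assumption⟩

theorem pvLoopA_run (m : Int) (xs : List Int) (hxs : ∀ b ∈ xs, 32 ≤ b ∧ b < 127) :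
    ∀ (ys : List Int) (i : Int) (ch : List (Int × String)) (cur : List Char) (off : Int),
      cur ≠ [] →
      pvLoopA m (xs ++ ys) i ch cur off
        = pvLoopA m ys (i + (xs.length : Int)) ch
            (cur ++ xs.map (fun c => Char.ofNat c.toNat)) off := by
  induction xs with
  | nil => intro ys i ch cur off _; simp
  | cons b rest ih =>
    intro ys i ch cur off hcur
    have hb := hxs b (by simp)
    have hsub : ∀ x ∈ rest, 32 ≤ x ∧ x < 127 := fun x hx => hxs x (by simp [hx])
    simp only [List.cons_append, pvLoopA, if_pos hb]
    rw [if_neg (by simp [List.isEmpty_iff, hcur])]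
    rw [ih hsub ys (i + 1) ch (cur ++ [Char.ofNat b.toNat]) off (by simp)]
    have h1 : i + 1 + (rest.length : Int) = i + ((b :: rest).length : Int) := by
      simp only [List.length_cons]; push_cast; ring
    have h2 : cur ++ [Char.ofNat b.toNat] ++ rest.map (fun c => Char.ofNat c.toNat)
        = cur ++ (b :: rest).map (fun c => Char.ofNat c.toNat) := by
      simp
    rw [h1, h2]

theorem pvLoop_eq_scan (m : Int) (hm : 1 ≤ m) : ∀ (n : Nat) (data : List Int),
    data.length ≤ n → ∀ (i : Int) (ch : List (Int × String)) (off : Int),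
    pvLoopA m data i ch [] off = ch ++ pvScanB m data i := by
  have hnil : ∀ (i : Int) (ch : List (Int × String))
      (off : Int), pvLoopA m ([] : List Int) i ch [] off = ch ++ pvScanB m [] i := by
    intro i ch off
    simp only [pvLoopA, pvScanB, List.length_nil]
    rw [if_neg (by omega)]; simp
  intro n
  induction n with
  | zero =>
    intro data hlen i ch off
    have hd : data = [] := List.eq_nil_of_length_eq_zero (Nat.le_zero.1 hlen)
    subst hd; exact hnil i ch off
  | succ n ih =>
    intro data hlen i ch off
    match data with
    | [] => exact hnil i ch off
    | b :: rest =>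
      have hrestlen : rest.length ≤ n := by simpa using Nat.lt_succ_iff.mp (by simpa using hlen)
      by_cases hb : 32 ≤ b ∧ b < 127
      · -- printable head: consume the whole run
        set r := pvRunLen rest with hrdef
        have hr : r ≤ rest.length := pvRunLen_le rest
        have hsplit : rest = rest.take r ++ rest.drop r := (List.take_append_drop r rest).symm
        have htklen : ((rest.take r).length : Int) = (r : Int) := by
          simp [List.length_take, Nat.min_eq_left hr]
        simp only [pvLoopA, if_pos hb]
        rw [if_pos (by simp), List.nil_append]
        conv_lhs => rw [hsplit]
        rw [pvLoopA_run m (rest.take r) (pvRunLen_take rest) (rest.drop r) (i + 1) ch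
          [Char.ofNat b.toNat] i (by simp)]
        have hcur : [Char.ofNat b.toNat] ++ (rest.take r).map (fun c => Char.ofNat c.toNat)
            = ((b :: rest).take (1 + r)).map (fun c => Char.ofNat c.toNat) := by
          rw [show 1 + r = r + 1 by omega, List.take_succ_cons]; simp
        have hscan : pvScanB m (b :: rest) i
            = (if m ≤ ((1 + r : Nat) : Int) then
                [(i, String.ofList (((b :: rest).take (1 + r)).map (fun c => Char.ofNat c.toNat)))]
              else []) ++ pvScanB m ((b :: rest).drop (1 + r)) (i + ((1 + r : Nat) : Int)) := by
          rw [pvScanB]; rw [if_pos hb]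
        have hdropcons : (b :: rest).drop (1 + r) = rest.drop r := by
          rw [show 1 + r = r + 1 by omega, List.drop_succ_cons]
        have hdrop := pvRunLen_drop rest
        rw [← hrdef] at hdrop
        rcases hdrop with hend | ⟨c, ys', hys, hc⟩
        · -- run reaches the end of data
          rw [hend, hcur]
          simp only [pvLoopA]
          rw [hscan, hdropcons, hend]
          have hlen2 : ((((b :: rest).take (1 + r)).map
              (fun c => Char.ofNat c.toNat)).length : Int) = ((1 + r : Nat) : Int) := by
            simp [List.length_take]
            omega
          rw [hlen2]
          split_ifs <;> simp [pvScanB]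
        · -- run ends at a non-printable byte c, then recurse on ys'
          rw [hys, hcur]
          simp only [pvLoopA]
          rw [if_neg hc]
          have hylen : ys'.length ≤ n := by
            have := List.length_drop (l := rest) (i := r)
            rw [hys] at this
            simp at this
            omega
          have hlen3 : ((((b :: rest).take (1 + r)).map
              (fun c => Char.ofNat c.toNat)).length : Int) = ((1 + r : Nat) : Int) := by
            simp [List.length_take]
            omega
          have hscan2 : pvScanB m (c :: ys') (i + ((1 + r : Nat) : Int))
              = pvScanB m ys' (i + ((1 + r : Nat) : Int) + 1) := by
            rw [pvScanB, if_neg hc]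
          have hidx2 : i + 1 + ((rest.take r).length : Int) + 1 = i + ((1 + r : Nat) : Int) + 1 := by
            rw [htklen]; push_cast; ring
          rw [hscan, hdropcons, hys, hscan2, hlen3]
          split_ifs with hcond
          · rw [ih ys' hylen, hidx2]
            simp [List.append_assoc]
          · rw [ih ys' hylen, hidx2]
            simp
      · -- non-printable head: A flushes an empty current (no output since 1 ≤ m), both skip
        simp only [pvLoopA, if_neg hb, List.length_nil]
        rw [if_neg (by omega)]
        rw [ih rest hrestlen (i + 1) ch off]
        rw [pvScanB, if_neg hb]

-- ===== VERDICT (by name: the statement is the Claim_ definition above) =====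
theorem extraire_chaines_spec : Claim_equal_extraire_chaines := by
  intro data min_len _ hpre
  show extraire_chaines data min_len = extraire_chaines_alt data min_len
  unfold extraire_chaines extraire_chaines_alt
  simpa using pvLoop_eq_scan min_len hpre data.length data le_rfl 0 [] 0
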